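-- pv_equiv track=rewrite | github.com/OSU-STARLAB/LeaPformer | fairseq-leapformer/examples/speech_to_text/prep_mustc_data.py | remove_repeating_end
-- ===== SOURCE A (Python) =====
-- def remove_repeating_end(utterance, end_characters, lang):
--     for end_character in end_characters:
--         start_idx = end_idx = utterance.find(end_character)
--         #Loop executes while there are still repeating end characters
--         while utterance.count(end_character + end_character) != 0:
--             #Finds index of the character after end_character
--             while end_idx < len(utterance) and utterance[end_idx] == end_character:
--                 end_idx += 1
--             # If not repeating character, no need to check anything so go to next loop
--             if end_idx - start_idx == 1:
--                 start_idx = end_idx = utterance.find(end_character, start_idx+1)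
--                 continue
--
--             #Conditional satisfied if not at end of sentence
--             if end_idx < len(utterance):
--                 if lang in ["en", "de"]:
--                     # Conditional satisfied if the following character is a number (e.g., 1.7 billion) or
--                     # a space at the end (blank caused by prior processing) or
--                     # the following character + 1 is a capital (e.g., "Good ... Let's do that.") or non-period special character
--                     if utterance[end_idx].isdigit() or \
--                       (utterance[end_idx] == ' ' and end_idx + 1 == len(utterance)) or \
--                       (end_idx + 1 < len(utterance) and (utterance[end_idx + 1].isupper() or (not utterance[end_idx + 1].isalnum() and utterance[end_idx + 1] != "."))):
--                         utterance = utterance[0:start_idx] + end_character + utterance[end_idx:]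
--                     else:
--                         utterance = utterance[0:start_idx] + utterance[end_idx:]
--                 else:
--                     utterance = utterance[0:start_idx] + utterance[end_idx:]
--             #Conditional satisfied if at end of sentence
--             elif end_idx == len(utterance):
--                 utterance = utterance[0:start_idx] + end_character
--
--             #Finds the index of next end_character
--             start_idx = end_idx = utterance.find(end_character)
--
--     return utterance
-- ===== SOURCE B (Python) =====
-- def remove_repeating_end(utterance, end_characters, lang):
--     # One left-to-right pass per end character, collapsing each run with the local context rules.
--     ctx = lang in ("en", "de")
--     for c in end_characters:
--         n = len(utterance)
--         out = []
--         i = 0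
--         while i < n:
--             if utterance[i] != c:
--                 out.append(utterance[i])
--                 i += 1
--                 continue
--             j = i + 1
--             while j < n and utterance[j] == c:
--                 j += 1
--             if j - i == 1 or j == n:
--                 out.append(c)
--             elif ctx and (utterance[j].isdigit()
--                           or (utterance[j] == ' ' and j + 1 == n)
--                           or (j + 1 < n and (utterance[j + 1].isupper()
--                                              or (not utterance[j + 1].isalnum()
--                                                  and utterance[j + 1] != '.')))):
--                 out.append(c)
--             i = j
--         utterance = ''.join(out)
--     return utterance
-- ===== Notes on version B (the rewrite author's own statement) =====
-- stated objective: alternative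
-- what changed: A repeatedly rescans the whole string from position 0 (count + find + splice) after every collapsed run; B makes a single left-to-right pass per end character, emitting each run's collapsed form once using the same local context rules.
-- outside the precondition, e.g. on remove_repeating_end('abab', ['ab'], 'fr'): A does not finish within the time limit, B returns 'abab'; on remove_repeating_end('aa.', ['a', 'bc'], 'fr'): A returns '.', B returns '.'
import Mathlib
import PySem

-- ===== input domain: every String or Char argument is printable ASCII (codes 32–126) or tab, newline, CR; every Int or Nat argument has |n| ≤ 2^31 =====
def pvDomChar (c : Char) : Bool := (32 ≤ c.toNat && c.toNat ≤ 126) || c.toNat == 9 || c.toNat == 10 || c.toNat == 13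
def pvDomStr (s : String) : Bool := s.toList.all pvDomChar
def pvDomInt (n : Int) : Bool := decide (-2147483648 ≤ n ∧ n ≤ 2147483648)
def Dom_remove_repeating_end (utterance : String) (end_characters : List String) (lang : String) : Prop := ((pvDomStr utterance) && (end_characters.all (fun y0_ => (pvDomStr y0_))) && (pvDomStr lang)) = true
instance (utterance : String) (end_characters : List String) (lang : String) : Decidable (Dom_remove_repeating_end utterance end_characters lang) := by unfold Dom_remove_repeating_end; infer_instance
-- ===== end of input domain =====

-- B replaces A's repeated rescan-from-zero (count + find + splice per collapsed run) by a single
-- left-to-right pass per end character applying the same local context rules.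


-- ===== PORT A =====
-- inner while: `while end_idx < len(utterance) and utterance[end_idx] == end_character: end_idx += 1`
-- (pyGet? none is unreachable under Pre_, where 0 ≤ end_idx; we return end_idx there)
def pvA_scanEnd (ecl : List Char) (u : List Char) (e : Int) : Int :=
  if he : e < (u.length : Int) then
    match PySem.List.pyGet? u e with
    | some ch => if [ch] == ecl then pvA_scanEnd ecl u (e + 1) else e
    | none => e
  else e
termination_by ((u.length : Int) - e).toNat
decreasing_by omega

-- the keep condition of A's `if lang in ["en","de"]` branch, character accesses via pyGet?
def pvA_cond (u : List Char) (e : Int) : Bool :=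
  ((PySem.List.pyGet? u e).any PySem.Chars.isdigit) ||
  (PySem.List.pyGet? u e == some ' ' && e + 1 == (u.length : Int)) ||
  (decide (e + 1 < (u.length : Int)) &&
    ((PySem.List.pyGet? u (e + 1)).any PySem.Chars.isupper ||
     (!((PySem.List.pyGet? u (e + 1)).any PySem.Chars.isalnum) && PySem.List.pyGet? u (e + 1) != some '.')))

-- the `while utterance.count(end_character + end_character) != 0` loop; fuel bounds the
-- iteration count (sufficient under Pre_, proved below); start is `start_idx` (= `end_idx`)
def pvA_loop (lang : String) (ecl : List Char) : Nat → List Char → Int → List Char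
  | 0, u, _ => u
  | Nat.succ f, u, start =>
    if PySem.Chars.count u (ecl ++ ecl) ≠ 0 then
      let e := pvA_scanEnd ecl u start
      if e - start == 1 then
        pvA_loop lang ecl f u (PySem.Chars.findFrom u ecl (start + 1) none)
      else if e < (u.length : Int) then
        if lang == "en" || lang == "de" then
          if pvA_cond u e then
            let u' := PySem.List.slice u (some 0) (some start) ++ ecl ++ PySem.List.slice u (some e) none
            pvA_loop lang ecl f u' (PySem.Chars.find u' ecl)
          else
            let u' := PySem.List.slice u (some 0) (some start) ++ PySem.List.slice u (some e) none
            pvA_loop lang ecl f u' (PySem.Chars.find u' ecl)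
        else
          let u' := PySem.List.slice u (some 0) (some start) ++ PySem.List.slice u (some e) none
          pvA_loop lang ecl f u' (PySem.Chars.find u' ecl)
      else if e == (u.length : Int) then
        let u' := PySem.List.slice u (some 0) (some start) ++ ecl
        pvA_loop lang ecl f u' (PySem.Chars.find u' ecl)
      else
        pvA_loop lang ecl f u (PySem.Chars.find u ecl)
    else u

def remove_repeating_end (utterance : String) (end_characters : List String) (lang : String) : String :=
  String.ofList (end_characters.foldl (fun u ec =>
    let ecl := ec.toList
    pvA_loop lang ecl ((u.length + 2) * (u.length + 2)) u (PySem.Chars.find u ecl)) utterance.toList)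

-- ===== PORT B =====
-- `while j < n and utterance[j] == c: j += 1`
def pvB_runEnd (ecl : List Char) (u : List Char) (j : Nat) : Nat :=
  if h : j < u.length then
    if [u[j]] = ecl then pvB_runEnd ecl u (j + 1) else j
  else j
termination_by u.length - j

theorem pvB_runEnd_ge (ecl : List Char) (u : List Char) : ∀ j, j ≤ pvB_runEnd ecl u j := by
  intro j
  induction hn : u.length - j using Nat.strong_induction_on generalizing j with
  | _ n ih =>
    unfold pvB_runEnd
    split
    · split
      · have := ih (u.length - (j + 1)) (by omega) (j + 1) rfl
        omega
      · exact le_refl j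
    · exact le_refl j

-- B's keep condition (only evaluated with j < u.length)
def pvB_cond (u : List Char) (j : Nat) : Bool :=
  PySem.Chars.isdigit (u.getD j ' ') ||
  (u.getD j ' ' == ' ' && j + 1 == u.length) ||
  (decide (j + 1 < u.length) &&
    (PySem.Chars.isupper (u.getD (j + 1) ' ') ||
     (!PySem.Chars.isalnum (u.getD (j + 1) ' ') && u.getD (j + 1) ' ' != '.')))

-- the `while i < n` pass of B
def pvB_go (ctx : Bool) (ecl : List Char) (u : List Char) (i : Nat) : List Char :=
  if h : i < u.length then
    if [u[i]] ≠ ecl then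
      u[i] :: pvB_go ctx ecl u (i + 1)
    else
      let j := pvB_runEnd ecl u (i + 1)
      if j - i == 1 || j == u.length then ecl ++ pvB_go ctx ecl u j
      else if ctx && pvB_cond u j then ecl ++ pvB_go ctx ecl u j
      else pvB_go ctx ecl u j
  else []
termination_by u.length - i
decreasing_by
  · omega
  all_goals (have := pvB_runEnd_ge ecl u (i + 1); omega)

def remove_repeating_end_alt (utterance : String) (end_characters : List String) (lang : String) : String :=
  let ctx := lang == "en" || lang == "de"
  String.ofList (end_characters.foldl (fun u ec => pvB_go ctx ec.toList u 0) utterance.toList)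

-- ===== PRECONDITION & SPEC =====
-- A loops forever when the doubled form of an end character of length ≠ 1 occurs in the (partially
-- collapsed) utterance. Pre_ admits lists of single-character end characters, and otherwise requires
-- that no end character's doubled form occurs in the utterance (then nothing is ever collapsed);
-- this is conservative: a mixed list whose single characters do collapse is excluded even when the
-- multi-character double never forms, because that cannot be told apart in closed form.
def Pre_remove_repeating_end (utterance : String) (end_characters : List String) (lang : String) : Prop :=
  (∀ ec ∈ end_characters, ec.toList.length = 1) ∨
  (∀ ec ∈ end_characters, PySem.Chars.isIn (ec.toList ++ ec.toList) utterance.toList = false)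
instance (utterance : String) (end_characters : List String) (lang : String) : Decidable (Pre_remove_repeating_end utterance end_characters lang) := by unfold Pre_remove_repeating_end; infer_instance

def pvWitness_remove_repeating_end : String × List String × String := ("Wait... Stop!! now.. 1.5", [".", "!"], "en")

def Spec_remove_repeating_end (utterance : String) (end_characters : List String) (lang : String) (out : String) : Prop := out = remove_repeating_end_alt utterance end_characters lang
instance (utterance : String) (end_characters : List String) (lang : String) (out : String) : Decidable (Spec_remove_repeating_end utterance end_characters lang out) := by unfold Spec_remove_repeating_end; infer_instance

-- ===== CLAIM (what is proved, stated in full; the proofs are below) =====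
def Claim_equal_remove_repeating_end : Prop := ∀ (utterance : String) (end_characters : List String) (lang : String), Dom_remove_repeating_end utterance end_characters lang → Pre_remove_repeating_end utterance end_characters lang → Spec_remove_repeating_end utterance end_characters lang (remove_repeating_end utterance end_characters lang)

-- ===== LEMMAS AND PROOFS =====

-- the canonical run-collapsing function both ports compute (proof-side only)
def pvLead (c : Char) (xs : List Char) : Nat := (xs.takeWhile (fun y => y == c)).length

def pvKeep (ctx : Bool) (s : List Char) : Bool :=
  ctx && (match s with
    | [] => false
    | d :: rest => PySem.Chars.isdigit d || (d == ' ' && rest.isEmpty) ||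
        (match rest with
         | [] => false
         | d2 :: _ => PySem.Chars.isupper d2 || (!PySem.Chars.isalnum d2 && d2 != '.')))

def pvS (ctx : Bool) (c : Char) : List Char → List Char
  | [] => []
  | x :: xs =>
    if x == c then
      let k := pvLead c xs
      if k == 0 then c :: pvS ctx c xs
      else
        let s := xs.drop k
        if s.isEmpty then [c]
        else if pvKeep ctx s then c :: pvS ctx c s else pvS ctx c s
    else x :: pvS ctx c xs
termination_by xs => xs.length
decreasing_by
  all_goals
    (have h1 : (xs.drop (pvLead c xs)).length ≤ xs.length := by simp
     simp only [List.length_cons]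
     omega)

-- basic facts about the run-length helper pvLead
theorem pvLead_nil (c : Char) : pvLead c [] = 0 := rfl

theorem pvLead_eq_zero (c : Char) (xs : List Char) (h : xs.head? ≠ some c) : pvLead c xs = 0 := by
  cases xs with
  | nil => rfl
  | cons x t =>
    simp only [List.head?_cons, ne_eq, Option.some.injEq] at h
    simp [pvLead, List.takeWhile_cons, h]

theorem pvLead_cons_self (c : Char) (xs : List Char) : pvLead c (c :: xs) = pvLead c xs + 1 := by
  simp [pvLead]

theorem pvLead_le (c : Char) (xs : List Char) : pvLead c xs ≤ xs.length := by
  simpa [pvLead] using (List.takeWhile_sublist (fun y => y == c) (l := xs)).length_le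

theorem pvLead_zero_head (c : Char) (l : List Char) (h : pvLead c l = 0) : l.head? ≠ some c := by
  cases l with
  | nil => simp
  | cons x t =>
    intro hx
    simp only [List.head?_cons, Option.some.injEq] at hx
    rw [hx, pvLead_cons_self] at h
    omega

theorem pv_dropWhile_eq_drop (p : Char → Bool) (l : List Char) :
    l.dropWhile p = l.drop (l.takeWhile p).length := by
  induction l with
  | nil => rfl
  | cons y ys ih => by_cases h : p y <;> simp [List.dropWhile_cons, List.takeWhile_cons, h, ih]

theorem pvLead_decomp (c : Char) (xs : List Char) :
    List.replicate (pvLead c xs) c ++ xs.drop (pvLead c xs) = xs := by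
  have h1 : xs.takeWhile (fun y => y == c) = List.replicate (pvLead c xs) c := by
    rw [List.eq_replicate_iff]
    refine ⟨rfl, fun b hb => ?_⟩
    have := List.mem_takeWhile_imp hb
    simpa using this
  have h2 : xs.drop (pvLead c xs) = xs.dropWhile (fun y => y == c) := by
    rw [pv_dropWhile_eq_drop]; rfl
  rw [h2, ← h1, List.takeWhile_append_dropWhile]

theorem pv_dropWhile_head_not (p : Char → Bool) (l : List Char) (x : Char)
    (h : (l.dropWhile p).head? = some x) : p x = false := by
  induction l with
  | nil => simp [List.dropWhile] at h
  | cons y ys ih =>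
    rw [List.dropWhile_cons] at h
    split at h
    · exact ih h
    · rename_i hpy
      simp at h
      subst h
      simpa using hpy

theorem pvLead_drop_head (c : Char) (xs : List Char) : (xs.drop (pvLead c xs)).head? ≠ some c := by
  have h2 : xs.drop (pvLead c xs) = xs.dropWhile (fun y => y == c) := by
    rw [pv_dropWhile_eq_drop]; rfl
  rw [h2]
  intro h
  have := pv_dropWhile_head_not _ _ _ h
  simp at this

theorem pvLead_replicate_append (c : Char) (m : Nat) (z : List Char) (hz : z.head? ≠ some c) :
    pvLead c (List.replicate m c ++ z) = m := by
  induction m with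
  | zero => simpa using pvLead_eq_zero c z hz
  | succ n ih => simpa [List.replicate_succ, pvLead_cons_self] using ih

-- no two adjacent c's in u
def pvNoCC (c : Char) (u : List Char) : Prop := ∀ k : Nat, ¬ (u[k]? = some c ∧ u[k + 1]? = some c)

theorem pvNoCC_tail (c x : Char) (xs : List Char) (h : pvNoCC c (x :: xs)) : pvNoCC c xs := by
  intro k hk
  exact h (k + 1) (by simpa using hk)

theorem pvNoCC_head (c : Char) (xs : List Char) (h : pvNoCC c (c :: xs)) : xs.head? ≠ some c := by
  intro hh
  exact h 0 (by simp [← List.head?_eq_getElem?, hh])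

theorem pvS_nil (ctx : Bool) (c : Char) : pvS ctx c [] = [] := by rw [pvS]

theorem pvS_cons_ne (ctx : Bool) (c x : Char) (z : List Char) (hx : x ≠ c) :
    pvS ctx c (x :: z) = x :: pvS ctx c z := by
  rw [pvS]
  simp [hx]

theorem pvS_cons_c (ctx : Bool) (c : Char) (z : List Char) (hz : z.head? ≠ some c) :
    pvS ctx c (c :: z) = c :: pvS ctx c z := by
  rw [pvS]
  simp [pvLead_eq_zero c z hz]

theorem pvS_id (ctx : Bool) (c : Char) (u : List Char) (h : pvNoCC c u) : pvS ctx c u = u := by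
  induction u with
  | nil => exact pvS_nil ctx c
  | cons x xs ih =>
    by_cases hx : x = c
    · subst hx
      rw [pvS_cons_c ctx x xs (pvNoCC_head x xs h), ih (pvNoCC_tail x x xs h)]
    · rw [pvS_cons_ne ctx c x xs hx, ih (pvNoCC_tail c x xs h)]

theorem pvS_append (ctx : Bool) (c : Char) (a z : List Char)
    (h : pvNoCC c a) (hj : a.getLast? = some c → z.head? ≠ some c) :
    pvS ctx c (a ++ z) = a ++ pvS ctx c z := by
  induction a with
  | nil => simp
  | cons x a' ih =>
    have ih' := ih (pvNoCC_tail c x a' h) (fun hl => hj (by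
      cases a' with
      | nil => simp_all
      | cons y t => simpa [List.getLast?_cons_cons] using hl))
    by_cases hx : x = c
    · subst hx
      have hhead : (a' ++ z).head? ≠ some x := by
        cases a' with
        | nil =>
          simpa using hj (by simp)
        | cons y t =>
          have := pvNoCC_head x (y :: t) h
          simpa using this
      rw [List.cons_append, pvS_cons_c ctx x (a' ++ z) hhead, ih']
      rfl
    · rw [List.cons_append, pvS_cons_ne ctx c x (a' ++ z) hx, ih']
      rfl

theorem pvS_run (ctx : Bool) (c : Char) (r : Nat) (z : List Char) (hr : 2 ≤ r)
    (hz : z.head? ≠ some c) :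
    pvS ctx c (List.replicate r c ++ z)
      = if z.isEmpty then [c] else if pvKeep ctx z then c :: pvS ctx c z else pvS ctx c z := by
  obtain ⟨m, rfl⟩ : ∃ m, r = m + 2 := ⟨r - 2, by omega⟩
  have hrepl : List.replicate (m + 2) c ++ z = c :: (List.replicate (m + 1) c ++ z) := by
    simp [List.replicate_succ]
  rw [hrepl, pvS]
  have hlead : pvLead c (List.replicate (m + 1) c ++ z) = m + 1 :=
    pvLead_replicate_append c (m + 1) z hz
  have hdrop : (List.replicate (m + 1) c ++ z).drop (m + 1) = z := by
    have h0 : List.drop (List.replicate (m + 1) c).length (List.replicate (m + 1) c ++ z) = z :=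
      List.drop_left
    simpa using h0
  simp [hlead, hdrop]

theorem pv_count_go_le (sub : List Char) : ∀ (fuel : Nat) (s : List Char) (acc : Nat), acc ≤ PySem.Chars.count.go sub fuel s acc := by
  intro fuel
  induction fuel with
  | zero => intro s acc; rw [PySem.Chars.count.go]
  | succ f ih =>
    intro s acc
    cases s with
    | nil =>
      rw [PySem.Chars.count.go]
      omega
    | cons h t =>
      rw [PySem.Chars.count.go]
      split
      · exact le_trans (by omega) (ih _ _)
      · exact ih _ _

theorem pv_count_go_eq_iff (sub : List Char) (hsub : sub ≠ []) :
    ∀ (fuel : Nat) (s : List Char), s.length ≤ fuel → ∀ acc,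
      (PySem.Chars.count.go sub fuel s acc = acc ↔ ¬ sub <:+: s) := by
  intro fuel
  induction fuel with
  | zero =>
    intro s hs acc
    have : s = [] := by cases s <;> simp_all
    subst this
    rw [PySem.Chars.count.go]
    simpa using hsub
  | succ f ih =>
    intro s hs acc
    cases s with
    | nil =>
      rw [PySem.Chars.count.go]
      · exact ⟨fun _ hinf => absurd (by simpa using hinf) hsub, fun _ => rfl⟩
      · omega
    | cons h t =>
      rw [PySem.Chars.count.go]
      split
      · rename_i hp
        have hpre : sub <+: h :: t := List.isPrefixOf_iff_prefix.mp hp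
        constructor
        · intro heq
          have := pv_count_go_le sub f (List.drop sub.length (h :: t)) (acc + 1)
          omega
        · intro hni
          exact absurd hpre.isInfix hni
      · rename_i hp
        have hlen : t.length ≤ f := by simp at hs; omega
        rw [ih t hlen acc]
        constructor
        · intro hni hinf
          rcases List.infix_cons_iff.mp hinf with hpre | hinf'
          · exact hp (List.isPrefixOf_iff_prefix.mpr hpre)
          · exact hni hinf'
        · intro hni hinf
          exact hni (List.infix_cons_iff.mpr (Or.inr hinf))

theorem pv_infix_cc_iff (c : Char) (u : List Char) :
    [c, c] <:+: u ↔ ∃ k : Nat, u[k]? = some c ∧ u[k + 1]? = some c := by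
  constructor
  · rintro ⟨s, t, rfl⟩
    refine ⟨s.length, ?_, ?_⟩ <;>
      simp [List.getElem?_append_right, Nat.le_refl]
  · rintro ⟨k, hk, hk1⟩
    induction k generalizing u with
    | zero =>
      cases u with
      | nil => simp at hk
      | cons x u' =>
        cases u' with
        | nil => simp at hk1
        | cons y u'' =>
          simp at hk hk1
          subst hk; subst hk1
          exact ⟨[], u'', rfl⟩
    | succ n ihn =>
      cases u with
      | nil => simp at hk
      | cons x u' =>
        simp only [List.getElem?_cons_succ] at hk hk1
        exact List.infix_cons (ihn u' hk hk1)

-- count(cc) ≠ 0 detects an adjacent double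
theorem pv_count_ne_zero (c : Char) (u : List Char) :
    (PySem.Chars.count u ([c] ++ [c]) ≠ 0) ↔ (∃ k : Nat, u[k]? = some c ∧ u[k + 1]? = some c) := by
  rw [← pv_infix_cc_iff]
  show (PySem.Chars.count u [c, c] ≠ 0) ↔ _
  unfold PySem.Chars.count
  have h0 := pv_count_go_eq_iff [c, c] (by simp) u.length u le_rfl 0
  simp only [List.isEmpty_cons, Bool.false_eq_true, if_false, ne_eq, h0, not_not]


theorem pv_scanEnd_eq (c : Char) (u : List Char) : ∀ (s : Nat), s ≤ u.length →
    pvA_scanEnd [c] u (s : Int) = ((s + pvLead c (u.drop s) : Nat) : Int) := by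
  intro s
  induction hn : u.length - s using Nat.strong_induction_on generalizing s with
  | _ n ih =>
    intro hs
    rw [pvA_scanEnd]
    by_cases hlt : s < u.length
    · have hlt' : ((s : Int) < (u.length : Int)) := by exact_mod_cast hlt
      rw [dif_pos hlt']
      have hget : PySem.List.pyGet? u ((s : Nat) : Int) = u[s]? := by simp [pysem]
      have hsome : u[s]? = some u[s] := List.getElem?_eq_getElem hlt
      have hdropc : u.drop s = u[s] :: u.drop (s + 1) := List.drop_eq_getElem_cons hlt
      by_cases hc : u[s] = c
      · have hbeq : ([u[s]] == [c]) = true := by simp [hc]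
        simp only [hget, hsome, hbeq, if_true]
        have hrec := ih (u.length - (s + 1)) (by omega) (s + 1) rfl (by omega)
        have hcast : ((s : Int) + 1) = (((s + 1 : Nat)) : Int) := by push_cast; ring
        rw [hcast, hrec]
        have hlead : pvLead c (u.drop s) = pvLead c (u.drop (s + 1)) + 1 := by
          rw [hdropc, hc, pvLead_cons_self]
        rw [hlead]
        push_cast
        ring
      · have hbeq : ([u[s]] == [c]) = false := by simp [hc]
        simp only [hget, hsome, hbeq, if_false]
        have hlead : pvLead c (u.drop s) = 0 := by
          apply pvLead_eq_zero
          rw [List.head?_drop, hsome]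
          simpa using hc
        simp [hlead]
    · have hslen : s = u.length := by omega
      have hlt' : ¬ ((s : Int) < (u.length : Int)) := by exact_mod_cast hlt
      rw [dif_neg hlt']
      have hdrop : u.drop s = [] := List.drop_eq_nil_of_le (by omega)
      simp [hdrop, pvLead_nil]

theorem pvB_runEnd_eq (c : Char) (u : List Char) : ∀ (j : Nat), j ≤ u.length →
    pvB_runEnd [c] u j = j + pvLead c (u.drop j) := by
  intro j
  induction hn : u.length - j using Nat.strong_induction_on generalizing j with
  | _ n ih =>
    intro hj
    rw [pvB_runEnd]
    by_cases hlt : j < u.length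
    · rw [dif_pos hlt]
      have hdropc : u.drop j = u[j] :: u.drop (j + 1) := List.drop_eq_getElem_cons hlt
      by_cases hc : u[j] = c
      · have hbeq : ([u[j]] = [c]) := by simp [hc]
        rw [if_pos hbeq]
        have hrec := ih (u.length - (j + 1)) (by omega) (j + 1) rfl (by omega)
        rw [hrec, hdropc, hc, pvLead_cons_self]
        omega
      · have hbeq : ¬ ([u[j]] = [c]) := by simp [hc]
        rw [if_neg hbeq]
        have hlead : pvLead c (u.drop j) = 0 := by
          apply pvLead_eq_zero
          rw [List.head?_drop, List.getElem?_eq_getElem hlt]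
          simpa using hc
        omega
    · rw [dif_neg hlt]
      have hdrop : u.drop j = [] := List.drop_eq_nil_of_le (by omega)
      simp [hdrop, pvLead_nil]

-- A's loop invariant on start_idx
def pvInv (c : Char) (u : List Char) (st : Int) : Prop :=
  0 ≤ st ∧ st.toNat < u.length ∧ u[st.toNat]? = some c ∧
    ∀ k : Nat, k + 1 ≤ st.toNat → ¬ (u[k]? = some c ∧ u[k + 1]? = some c)

def pvMu (u : List Char) (st : Int) : Nat := u.length * (u.length + 2) + u.length - st.toNat

theorem pv_singleton_prefix (c : Char) (l : List Char) : [c] <+: l ↔ l.head? = some c := by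
  cases l with
  | nil => simp
  | cons x t => simp [List.cons_prefix_cons, eq_comm]

theorem pv_mem_infix (c : Char) (l : List Char) (h : c ∈ l) : [c] <:+: l := by
  obtain ⟨p, q, rfl⟩ := List.append_of_mem h
  exact ⟨p, q, by simp⟩

theorem pv_find_inv (c : Char) (v : List Char)
    (hdd : ∃ k : Nat, v[k]? = some c ∧ v[k + 1]? = some c) :
    pvInv c v (PySem.Chars.find v [c]) := by
  obtain ⟨k, hk, _⟩ := hdd
  have hmem : c ∈ v := List.mem_of_getElem? hk
  have h0 : 0 ≤ PySem.Chars.find v [c] :=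
    (PySem.Chars.find_nonneg_iff v [c]).mpr (pv_mem_infix c v hmem)
  obtain ⟨hpre, hmin⟩ := PySem.Chars.find_spec h0
  have hc : v[(PySem.Chars.find v [c]).toNat]? = some c := by
    rw [← List.head?_drop]
    exact (pv_singleton_prefix c _).mp hpre
  have hlen : (PySem.Chars.find v [c]).toNat < v.length := (List.getElem?_eq_some_iff.mp hc).1
  refine ⟨h0, hlen, hc, ?_⟩
  intro k2 hk2 ⟨ha, _⟩
  exact hmin k2 (by omega) ((pv_singleton_prefix c _).mpr (by rwa [List.head?_drop]))

theorem pv_slice_take (u : List Char) (k : Nat) :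
    PySem.List.slice u (some 0) (some (k : Int)) = u.take k := by simp [pysem]

theorem pv_slice_drop (u : List Char) (k : Nat) :
    PySem.List.slice u (some (k : Int)) none = u.drop k := by simp [pysem]

theorem pvMu_lt_of_len_lt (v u : List Char) (st' st : Int) (hlen : v.length < u.length)
    (hst : st.toNat ≤ u.length) : pvMu v st' < pvMu u st := by
  unfold pvMu
  have h1 : v.length * (v.length + 2) + v.length + 1 ≤ u.length * (u.length + 2) := by
    nlinarith [hlen]
  omega

theorem pvA_cond_eq (u : List Char) (j : Nat) (hj : j < u.length) :
    pvA_cond u ((j : Nat) : Int) = pvKeep true (u.drop j) := by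
  have hd : u.drop j = u[j] :: u.drop (j + 1) := List.drop_eq_getElem_cons hj
  have hg : PySem.List.pyGet? u ((j : Nat) : Int) = some u[j] := by
    simp [pysem, List.getElem?_eq_getElem hj]
  have hcast : ((j : Nat) : Int) + 1 = (((j + 1 : Nat)) : Int) := by push_cast; ring
  by_cases h1 : j + 1 < u.length
  · have hd1 : u.drop (j + 1) = u[j + 1] :: u.drop (j + 2) := List.drop_eq_getElem_cons h1
    have hg1 : PySem.List.pyGet? u (((j : Nat) : Int) + 1) = some u[j + 1] := by
      rw [hcast, PySem.List.pyGet?_natCast]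
      exact List.getElem?_eq_getElem h1
    have hne : (((j : Nat) : Int) + 1 == (u.length : Int)) = false := by
      rw [beq_eq_false_iff_ne]
      omega
    have hlt : decide (((j : Nat) : Int) + 1 < (u.length : Int)) = true := by
      rw [decide_eq_true_eq]
      omega
    rw [hd, hd1]
    simp only [pvA_cond, pvKeep, hg, hg1, hne, hlt, List.isEmpty_cons]
    simp [bne]
  · have hlen : j + 1 = u.length := by omega
    have hd1 : u.drop (j + 1) = [] := List.drop_eq_nil_of_le (by omega)
    have heq : (((j : Nat) : Int) + 1 == (u.length : Int)) = true := by
      rw [beq_iff_eq]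
      omega
    have hlt : decide (((j : Nat) : Int) + 1 < (u.length : Int)) = false := by
      rw [decide_eq_false_iff_not]
      omega
    rw [hd, hd1]
    simp only [pvA_cond, pvKeep, hg, heq, hlt, List.isEmpty_nil]
    simp

-- zeta-reduced unfolding of one iteration of A's while loop
theorem pvA_loop_succ (lang : String) (ecl : List Char) (f : Nat) (u : List Char) (start : Int) :
    pvA_loop lang ecl (f + 1) u start =
      if PySem.Chars.count u (ecl ++ ecl) ≠ 0 then
        if pvA_scanEnd ecl u start - start == 1 then
          pvA_loop lang ecl f u (PySem.Chars.findFrom u ecl (start + 1) none)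
        else if pvA_scanEnd ecl u start < (u.length : Int) then
          if lang == "en" || lang == "de" then
            if pvA_cond u (pvA_scanEnd ecl u start) then
              pvA_loop lang ecl f
                (PySem.List.slice u (some 0) (some start) ++ ecl ++
                  PySem.List.slice u (some (pvA_scanEnd ecl u start)) none)
                (PySem.Chars.find
                  (PySem.List.slice u (some 0) (some start) ++ ecl ++
                    PySem.List.slice u (some (pvA_scanEnd ecl u start)) none) ecl)
            else
              pvA_loop lang ecl f
                (PySem.List.slice u (some 0) (some start) ++
                  PySem.List.slice u (some (pvA_scanEnd ecl u start)) none)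
                (PySem.Chars.find
                  (PySem.List.slice u (some 0) (some start) ++
                    PySem.List.slice u (some (pvA_scanEnd ecl u start)) none) ecl)
          else
            pvA_loop lang ecl f
              (PySem.List.slice u (some 0) (some start) ++
                PySem.List.slice u (some (pvA_scanEnd ecl u start)) none)
              (PySem.Chars.find
                (PySem.List.slice u (some 0) (some start) ++
                  PySem.List.slice u (some (pvA_scanEnd ecl u start)) none) ecl)
        else if pvA_scanEnd ecl u start == (u.length : Int) then
          pvA_loop lang ecl f (PySem.List.slice u (some 0) (some start) ++ ecl)
            (PySem.Chars.find (PySem.List.slice u (some 0) (some start) ++ ecl) ecl)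
        else
          pvA_loop lang ecl f u (PySem.Chars.find u ecl)
      else u := rfl

theorem pvA_loop_eq_S (lang : String) (c : Char) : ∀ (fuel : Nat) (u : List Char) (st : Int),
    ((∃ k : Nat, u[k]? = some c ∧ u[k + 1]? = some c) → pvInv c u st) →
    pvMu u st < fuel →
    pvA_loop lang [c] fuel u st = pvS (lang == "en" || lang == "de") c u := by
  intro fuel
  induction fuel with
  | zero => intro u st _ hfuel; omega
  | succ f ih =>
    intro u st hinv hfuel
    rw [pvA_loop_succ]
    by_cases hdd : ∃ k : Nat, u[k]? = some c ∧ u[k + 1]? = some c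
    case neg =>
      rw [if_neg (by simpa using (not_iff_not.mpr (pv_count_ne_zero c u)).mpr hdd)]
      exact (pvS_id _ c u (fun k hk => hdd ⟨k, hk⟩)).symm
    case pos =>
      obtain ⟨hst0, hstlen, hstc, hpre⟩ := hinv hdd
      have hcount : PySem.Chars.count u ([c] ++ [c]) ≠ 0 := (pv_count_ne_zero c u).mpr hdd
      rw [if_pos hcount]
      have hstcast : st = ((st.toNat : Nat) : Int) := (Int.toNat_of_nonneg hst0).symm
      set s := st.toNat with hsdef
      have hsL : s < u.length := hstlen
      have hscan := pv_scanEnd_eq c u s (le_of_lt hsL)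
      set r := pvLead c (u.drop s) with hrdef
      have hr1 : 1 ≤ r := by
        rcases Nat.eq_zero_or_pos r with h0 | h
        · exact absurd (by rw [List.head?_drop]; exact hstc)
            (pvLead_zero_head c _ (hrdef.symm.trans h0))
        · exact h
      have hrle : s + r ≤ u.length := by
        have h0 := pvLead_le c (u.drop s)
        rw [← hrdef] at h0
        simp at h0
        omega
      set Z := u.drop (s + r) with hZdef
      set A := u.take s with hAdef
      have hZ : Z.head? ≠ some c := by
        have h0 := pvLead_drop_head c (u.drop s)
        rw [List.drop_drop, ← hrdef] at h0
        rw [hZdef]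
        exact h0
      have hdecS : u.drop s = List.replicate r c ++ Z := by
        have h0 := pvLead_decomp c (u.drop s)
        rw [List.drop_drop, ← hrdef] at h0
        rw [hZdef, ← h0]
      have hdecU : u = A ++ (List.replicate r c ++ Z) := by
        rw [hAdef, ← hdecS, List.take_append_drop]
      have hAlen : A.length = s := by
        rw [hAdef]
        simp
        omega
      have hA : pvNoCC c A := by
        intro k ⟨h1, h2⟩
        have hk1 : k + 1 < A.length := (List.getElem?_eq_some_iff.mp h2).1
        rw [hAlen] at hk1
        refine hpre k (by omega) ⟨?_, ?_⟩
        · rw [hAdef, List.getElem?_take, if_pos (show k < s by omega)] at h1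
          exact h1
        · rw [hAdef, List.getElem?_take, if_pos (show k + 1 < s by omega)] at h2
          exact h2
      have hAlast : A.getLast? = some c → False := by
        intro h
        rcases Nat.eq_zero_or_pos s with hs0 | hs1
        · rw [hAdef, hs0] at h
          simp at h
        · rw [List.getLast?_eq_getElem?, hAlen] at h
          rw [hAdef, List.getElem?_take, if_pos (show s - 1 < s by omega)] at h
          refine hpre (s - 1) (by omega) ⟨h, ?_⟩
          rw [show s - 1 + 1 = s from by omega]
          exact hstc
      by_cases hr2 : r = 1
      · -- singleton run: the `continue` branch
        have hbeq : (pvA_scanEnd [c] u st - st == 1) = true := by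
          rw [hstcast, hscan, beq_iff_eq]
          push_cast
          omega
        rw [if_pos hbeq]
        rw [hstcast, show (((s : Nat) : Int) + 1) = (((s + 1 : Nat)) : Int) from by push_cast; ring]
        set st' := PySem.Chars.findFrom u [c] (((s + 1 : Nat)) : Int) with hst'
        have hsle : s + 1 ≤ u.length := by omega
        have hZ1 : u[s + 1]? ≠ some c := by
          have h0 := hZ
          rw [hZdef, List.head?_drop, show s + r = s + 1 from by omega] at h0
          exact h0
        have hne1 : st' ≠ -1 := by
          intro h
          apply (PySem.Chars.findFrom_natCast_eq_neg_one_iff u [c] (s + 1) hsle).mp (hst' ▸ h)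
          obtain ⟨k0, hk0, hk01⟩ := hdd
          have hk0ge : s + 1 ≤ k0 := by
            rcases Nat.lt_or_ge k0 s with h1 | h1
            · exact absurd ⟨hk0, hk01⟩ (hpre k0 (by omega))
            · rcases Nat.eq_or_lt_of_le h1 with h2 | h2
              · exact absurd (h2 ▸ hk01) hZ1
              · omega
          refine pv_mem_infix c _ (List.mem_of_getElem? (l := u.drop (s + 1)) (i := k0 - (s + 1)) ?_)
          rw [List.getElem?_drop, show s + 1 + (k0 - (s + 1)) = k0 from by omega]
          exact hk0
        obtain ⟨hge, hpref, hmin⟩ := PySem.Chars.findFrom_natCast_spec u [c] (s + 1) hsle hne1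
        have h0' : 0 ≤ st' := le_trans (by positivity) hge
        have hc' : u[st'.toNat]? = some c := by
          rw [← List.head?_drop]
          exact (pv_singleton_prefix c _).mp hpref
        have hlen' : st'.toNat < u.length := (List.getElem?_eq_some_iff.mp hc').1
        have hge' : s + 1 ≤ st'.toNat := by omega
        have hpre' : ∀ k2 : Nat, k2 + 1 ≤ st'.toNat →
            ¬ (u[k2]? = some c ∧ u[k2 + 1]? = some c) := by
          intro k2 hk2 ⟨ha, hb⟩
          rcases Nat.lt_or_ge k2 s with hlt2 | hge2
          · exact hpre k2 (by omega) ⟨ha, hb⟩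
          · rcases Nat.eq_or_lt_of_le hge2 with heq2 | hgt2
            · exact hZ1 (by rw [show s + 1 = k2 + 1 from by omega]; exact hb)
            · exact hmin k2 (by omega) (by omega)
                ((pv_singleton_prefix c _).mpr (by rw [List.head?_drop]; exact ha))
        apply ih u st' (fun _ => ⟨h0', hlen', hc', hpre'⟩)
        unfold pvMu at hfuel ⊢
        omega
      · -- a genuine run of length ≥ 2
        have hr2' : 2 ≤ r := by omega
        have hbeq : (pvA_scanEnd [c] u st - st == 1) = false := by
          rw [hstcast, hscan, beq_eq_false_iff_ne]
          push_cast
          omega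
        rw [hbeq]
        rw [if_neg (by simp)]
        have hSu : pvS (lang == "en" || lang == "de") c u
            = A ++ (if Z.isEmpty then [c]
                else if pvKeep (lang == "en" || lang == "de") Z then
                  c :: pvS (lang == "en" || lang == "de") c Z
                else pvS (lang == "en" || lang == "de") c Z) := by
          conv_lhs => rw [hdecU]
          rw [pvS_append _ c A _ hA (fun h => (hAlast h).elim),
            pvS_run _ c r Z hr2' hZ]
        have hsl0 : PySem.List.slice u (some 0) (some st) = A := by
          rw [hstcast, hAdef]
          exact pv_slice_take u s
        have hsle2 : PySem.List.slice u (some (pvA_scanEnd [c] u st)) none = Z := by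
          rw [hstcast, hscan, hZdef]
          exact pv_slice_drop u (s + r)
        by_cases hZlt : s + r < u.length
        · -- run followed by more text
          rw [if_pos (show pvA_scanEnd [c] u st < (u.length : Int) from by
            rw [hstcast, hscan]; exact_mod_cast hZlt)]
          have hZef : Z.isEmpty = false := by
            rw [hZdef]
            simp [List.isEmpty_iff, List.drop_eq_nil_iff]
            omega
          have hkeepeq : pvKeep true Z = pvA_cond u (pvA_scanEnd [c] u st) := by
            have h := pvA_cond_eq u (s + r) hZlt
            rw [← hZdef] at h
            rw [hstcast, hscan, h]
          have hlen1 : (A ++ [c] ++ Z).length < u.length := by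
            simp [hAlen, hZdef]
            omega
          have hlen2 : (A ++ Z).length < u.length := by
            simp [hAlen, hZdef]
            omega
          have hremove : pvA_loop lang [c] f (A ++ Z) (PySem.Chars.find (A ++ Z) [c])
              = A ++ pvS (lang == "en" || lang == "de") c Z := by
            rw [ih (A ++ Z) _ (fun hdd' => pv_find_inv c _ hdd') (by
              have := pvMu_lt_of_len_lt (A ++ Z) u (PySem.Chars.find (A ++ Z) [c]) st hlen2
                (by omega)
              omega)]
            rw [pvS_append _ c A Z hA (fun h => (hAlast h).elim)]
          cases hctx : (lang == "en" || lang == "de") with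
          | false =>
            rw [hctx] at hSu hremove
            rw [if_neg (by simp)]
            rw [hsl0, hsle2, hremove, hSu, hZef]
            have hk : pvKeep false Z = false := by simp [pvKeep]
            simp [hk]
          | true =>
            rw [hctx] at hSu hremove
            rw [if_pos rfl]
            cases hcnd : pvA_cond u (pvA_scanEnd [c] u st) with
            | false =>
              rw [if_neg (by simp)]
              rw [hsl0, hsle2, hremove, hSu, hZef]
              rw [hcnd] at hkeepeq
              simp [hkeepeq]
            | true =>
              rw [if_pos rfl]
              rw [hsl0, hsle2]
              rw [ih (A ++ [c] ++ Z) _ (fun hdd' => pv_find_inv c _ hdd') (by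
                have := pvMu_lt_of_len_lt (A ++ [c] ++ Z) u
                  (PySem.Chars.find (A ++ [c] ++ Z) [c]) st hlen1 (by omega)
                omega), hctx]
              rw [List.append_assoc, pvS_append _ c A _ hA (fun h => (hAlast h).elim)]
              rw [show ([c] ++ Z) = c :: Z from rfl, pvS_cons_c _ c Z hZ]
              rw [hSu, hZef]
              rw [hcnd] at hkeepeq
              simp [hkeepeq]
        · -- run reaches the end of the utterance
          have hZeq : s + r = u.length := by omega
          have hZnil : Z = [] := by
            rw [hZdef]
            exact List.drop_eq_nil_of_le (by omega)
          rw [if_neg (show ¬ pvA_scanEnd [c] u st < (u.length : Int) from by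
            rw [hstcast, hscan]; exact_mod_cast hZlt)]
          rw [if_pos (show (pvA_scanEnd [c] u st == (u.length : Int)) = true from by
            rw [hstcast, hscan, beq_iff_eq]; exact_mod_cast hZeq)]
          rw [hsl0]
          have hlen3 : (A ++ [c]).length < u.length := by
            simp [hAlen]
            omega
          rw [ih (A ++ [c]) _ (fun hdd' => pv_find_inv c _ hdd') (by
            have := pvMu_lt_of_len_lt (A ++ [c]) u (PySem.Chars.find (A ++ [c]) [c]) st hlen3
              (by omega)
            omega)]
          rw [pvS_append _ c A [c] hA (fun h => (hAlast h).elim)]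
          rw [pvS_cons_c _ c [] (by simp), pvS_nil]
          rw [hSu, hZnil]
          simp

theorem pvB_cond_eq (ctx : Bool) (u : List Char) (j : Nat) (hj : j < u.length) :
    (ctx && pvB_cond u j) = pvKeep ctx (u.drop j) := by
  have hd : u.drop j = u[j] :: u.drop (j + 1) := List.drop_eq_getElem_cons hj
  have hgd : u.getD j ' ' = u[j] := List.getD_eq_getElem u ' ' hj
  by_cases h1 : j + 1 < u.length
  · have hd1 : u.drop (j + 1) = u[j + 1] :: u.drop (j + 2) := List.drop_eq_getElem_cons h1
    have hgd1 : u.getD (j + 1) ' ' = u[j + 1] := List.getD_eq_getElem u ' ' h1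
    have hne : (j + 1 == u.length) = false := by simp; omega
    rw [hd, hd1]
    simp only [pvB_cond, pvKeep, hgd, hgd1, hne, decide_eq_true_eq, List.isEmpty_cons]
    simp [h1]
  · have hlen : j + 1 = u.length := by omega
    have hd1 : u.drop (j + 1) = [] := List.drop_eq_nil_of_le (by omega)
    rw [hd, hd1]
    simp only [pvB_cond, pvKeep, hgd, hd1, hlen]
    simp

theorem pvB_go_eq_S (ctx : Bool) (c : Char) (u : List Char) : ∀ (i : Nat), i ≤ u.length →
    pvB_go ctx [c] u i = pvS ctx c (u.drop i) := by
  intro i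
  induction hn : u.length - i using Nat.strong_induction_on generalizing i with
  | _ n ih =>
    intro hi
    rw [pvB_go]
    by_cases hlt : i < u.length
    · rw [dif_pos hlt]
      have hdropc : u.drop i = u[i] :: u.drop (i + 1) := List.drop_eq_getElem_cons hlt
      by_cases hc : u[i] = c
      · rw [if_neg (by simp [hc])]
        have hre : pvB_runEnd [c] u (i + 1) = i + 1 + pvLead c (u.drop (i + 1)) :=
          pvB_runEnd_eq c u (i + 1) (by omega)
        set k := pvLead c (u.drop (i + 1)) with hk
        set Z := u.drop (i + 1 + k) with hZdef
        have hZ : Z.head? ≠ some c := by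
          have h0 := pvLead_drop_head c (u.drop (i + 1))
          rw [List.drop_drop] at h0
          rw [hZdef, hk]
          exact h0
        have hkle : k ≤ u.length - (i + 1) := by
          have := pvLead_le c (u.drop (i + 1))
          rw [← hk] at this
          simpa using this
        have hdec : u.drop i = List.replicate (k + 1) c ++ Z := by
          rw [hdropc, hc]
          have h0 := pvLead_decomp c (u.drop (i + 1))
          rw [List.drop_drop, ← hk] at h0
          rw [hZdef, ← h0]
          simp [List.replicate_succ]
        simp only [hre]
        by_cases hk0 : k = 0
        · have hcond : (i + 1 + k - i == 1 || i + 1 + k == u.length) = true := by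
            have h1 : i + 1 + k - i = 1 := by omega
            simp [h1]
          rw [if_pos hcond, show i + 1 + k = i + 1 from by omega]
          have hgo := ih (u.length - (i + 1)) (by omega) (i + 1) rfl (by omega)
          rw [hgo, hdropc, hc]
          have hhead : (u.drop (i + 1)).head? ≠ some c :=
            pvLead_zero_head c _ (hk.symm.trans hk0)
          rw [pvS_cons_c ctx c _ hhead]
          rfl
        · have hrun := pvS_run ctx c (k + 1) Z (by omega) hZ
          by_cases hend : i + 1 + k = u.length
          · have hcond : (i + 1 + k - i == 1 || i + 1 + k == u.length) = true := by
              simp [hend]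
            rw [if_pos hcond]
            have hgo := ih (u.length - (i + 1 + k)) (by omega) (i + 1 + k) rfl (by omega)
            have hZnil : Z = [] := by rw [hZdef, hend]; simp
            rw [hgo, ← hZdef, hZnil, pvS_nil, hdec, hrun, hZnil]
            simp
          · have hcond : ¬ ((i + 1 + k - i == 1 || i + 1 + k == u.length) = true) := by
              simp
              omega
            rw [if_neg hcond]
            have hjlt : i + 1 + k < u.length := by omega
            have hgo := ih (u.length - (i + 1 + k)) (by omega) (i + 1 + k) rfl (by omega)
            have hcnd := pvB_cond_eq ctx u (i + 1 + k) hjlt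
            rw [← hZdef] at hcnd
            have hZe : Z.isEmpty = false := by
              rw [hZdef]
              simp [List.isEmpty_iff, List.drop_eq_nil_iff]
              omega
            rw [hcnd, hgo, ← hZdef, hdec, hrun, hZe]
            simp only [Bool.false_eq_true, if_false]
            by_cases hkeep : pvKeep ctx Z = true
            · rw [if_pos hkeep, if_pos hkeep]
              rfl
            · rw [if_neg hkeep, if_neg hkeep]
      · rw [if_pos (by simp [hc])]
        rw [ih (u.length - (i + 1)) (by omega) (i + 1) rfl (by omega), hdropc,
          pvS_cons_ne ctx c _ _ hc]
    · rw [dif_neg hlt]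
      have : u.drop i = [] := List.drop_eq_nil_of_le (by omega)
      rw [this, pvS_nil]

-- ===== VERDICT (by name: the statement is the Claim_ definition above) =====
theorem pv_step_eq (lang : String) (c : Char) (u : List Char) :
    pvA_loop lang [c] ((u.length + 2) * (u.length + 2)) u (PySem.Chars.find u [c])
      = pvB_go (lang == "en" || lang == "de") [c] u 0 := by
  rw [pvB_go_eq_S (lang == "en" || lang == "de") c u 0 (by omega), List.drop_zero]
  apply pvA_loop_eq_S lang c _ u _ (fun hdd => pv_find_inv c u hdd)
  unfold pvMu
  have h1 : u.length * (u.length + 2) + u.length < (u.length + 2) * (u.length + 2) := by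
    nlinarith
  omega

-- when no character of u equals the (non-single-character) end string, B's pass copies u
theorem pvB_go_stride (ctx : Bool) (ecl : List Char) (u : List Char) (hne : ∀ x : Char, [x] ≠ ecl) :
    ∀ (i : Nat), pvB_go ctx ecl u i = u.drop i := by
  intro i
  induction hn : u.length - i using Nat.strong_induction_on generalizing i with
  | _ n ih =>
    rw [pvB_go]
    by_cases hlt : i < u.length
    · rw [dif_pos hlt, if_pos (hne u[i]), ih (u.length - (i + 1)) (by omega) (i + 1) rfl]
      exact (List.drop_eq_getElem_cons hlt).symm
    · rw [dif_neg hlt]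
      exact (List.drop_eq_nil_of_le (by omega)).symm

-- when the doubled end string does not occur, A's while loop exits at once
theorem pvA_loop_no_double (lang : String) (ecl : List Char) (f : Nat) (u : List Char) (st : Int)
    (hecl : ecl ≠ []) (hni : ¬ (ecl ++ ecl) <:+: u) :
    pvA_loop lang ecl (f + 1) u st = u := by
  rw [pvA_loop_succ, if_neg]
  rw [ne_eq, not_not]
  unfold PySem.Chars.count
  rw [if_neg (by simpa using hecl)]
  exact (pv_count_go_eq_iff (ecl ++ ecl) (by simpa using hecl) u.length u le_rfl 0).mpr hni

theorem remove_repeating_end_spec : Claim_equal_remove_repeating_end := by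
  intro utterance ecs lang _hdom hpre
  unfold Spec_remove_repeating_end remove_repeating_end remove_repeating_end_alt
  have main : ∀ (l : List String), (∀ ec ∈ l, ec.toList.length = 1) → ∀ (u : List Char),
      l.foldl (fun u ec =>
          pvA_loop lang ec.toList ((u.length + 2) * (u.length + 2)) u
            (PySem.Chars.find u ec.toList)) u
        = l.foldl (fun u ec => pvB_go (lang == "en" || lang == "de") ec.toList u 0) u := by
    intro l
    induction l with
    | nil => intro _ u; rfl
    | cons ec rest ihl =>
      intro hp u
      simp only [List.foldl_cons]
      have h1 := hp ec List.mem_cons_self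
      obtain ⟨c, hc⟩ : ∃ c, ec.toList = [c] := by
        cases hec : ec.toList with
        | nil => rw [hec] at h1; simp at h1
        | cons c t =>
          rw [hec] at h1
          cases t with
          | nil => exact ⟨c, rfl⟩
          | cons d t' => simp at h1
      rw [hc, pv_step_eq lang c u]
      exact ihl (fun e he => hp e (List.mem_cons_of_mem _ he)) _
  rcases hpre with hpre | hpre
  · exact congrArg String.ofList (main ecs hpre utterance.toList)
  · -- no doubled end string occurs: both sides leave the utterance unchanged
    have main2 : ∀ (l : List String),
        (∀ ec ∈ l, PySem.Chars.isIn (ec.toList ++ ec.toList) utterance.toList = false) →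
        l.foldl (fun u ec =>
            pvA_loop lang ec.toList ((u.length + 2) * (u.length + 2)) u
              (PySem.Chars.find u ec.toList)) utterance.toList
          = l.foldl (fun u ec => pvB_go (lang == "en" || lang == "de") ec.toList u 0)
              utterance.toList := by
      intro l
      induction l with
      | nil => intro _; rfl
      | cons ec rest ihl =>
        intro hp
        have h1 := hp ec List.mem_cons_self
        have hni : ¬ (ec.toList ++ ec.toList) <:+: utterance.toList := by
          rw [← PySem.Chars.isIn_eq_false_iff (ec.toList ++ ec.toList) utterance.toList]
          exact h1
        have hecl : ec.toList ≠ [] := by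
          intro h
          rw [h] at hni
          exact hni (by simp)
        simp only [List.foldl_cons]
        have hA : pvA_loop lang ec.toList
            ((utterance.toList.length + 2) * (utterance.toList.length + 2)) utterance.toList
            (PySem.Chars.find utterance.toList ec.toList) = utterance.toList := by
          obtain ⟨f, hf⟩ : ∃ f, (utterance.toList.length + 2) * (utterance.toList.length + 2)
              = f + 1 := by
            have hpos : 0 < (utterance.toList.length + 2) * (utterance.toList.length + 2) := by
              positivity
            exact ⟨(utterance.toList.length + 2) * (utterance.toList.length + 2) - 1, by omega⟩
          rw [hf]
          exact pvA_loop_no_double lang ec.toList f utterance.toList _ hecl hni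
        have hB : pvB_go (lang == "en" || lang == "de") ec.toList utterance.toList 0
            = utterance.toList := by
          cases hec : ec.toList with
          | nil => exact absurd hec hecl
          | cons c t =>
            cases t with
            | nil =>
              rw [pvB_go_eq_S _ c utterance.toList 0 (by omega), List.drop_zero]
              apply pvS_id
              intro k hk
              rw [hec] at hni
              exact hni ((pv_infix_cc_iff c utterance.toList).mpr ⟨k, hk⟩)
            | cons d t' =>
              rw [pvB_go_stride _ _ _ (by intro x; simp), List.drop_zero]
        rw [hA, hB]
        exact ihl (fun e he => hp e (List.mem_cons_of_mem _ he))
    exact congrArg String.ofList (main2 ecs hpre)
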